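-- pv_equiv track=rewrite | github.com/Dloyr/Fac | L1/Semestre_2/Algo/TD/td_1/fonctions.py | meilleur_film
-- ===== SOURCE A (Python) =====
-- def meilleur_film(note_film: list[tuple[str, int]])-> str:
--     note = 0
--     titre = ""
--     for film in note_film:
--         if note <= film[1]:
--             note = film[1]
--             titre = film[0]
--
--     return titre
-- ===== SOURCE B (Python) =====
-- def meilleur_film(note_film: list[tuple[str, int]]) -> str:
--     best = 0
--     for _, n in note_film:
--         if n > best:
--             best = n
--     titre = ""
--     for t, n in note_film:
--         if n == best:
--             titre = t
--     return titre
-- ===== Notes on version B (the rewrite author's own statement) =====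
-- stated objective: alternative
-- what changed: Replaces the single coupled fold over (note, titre) by two independent passes: first compute best = max(0, max note), then take the last title whose note equals best.
import Mathlib
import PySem

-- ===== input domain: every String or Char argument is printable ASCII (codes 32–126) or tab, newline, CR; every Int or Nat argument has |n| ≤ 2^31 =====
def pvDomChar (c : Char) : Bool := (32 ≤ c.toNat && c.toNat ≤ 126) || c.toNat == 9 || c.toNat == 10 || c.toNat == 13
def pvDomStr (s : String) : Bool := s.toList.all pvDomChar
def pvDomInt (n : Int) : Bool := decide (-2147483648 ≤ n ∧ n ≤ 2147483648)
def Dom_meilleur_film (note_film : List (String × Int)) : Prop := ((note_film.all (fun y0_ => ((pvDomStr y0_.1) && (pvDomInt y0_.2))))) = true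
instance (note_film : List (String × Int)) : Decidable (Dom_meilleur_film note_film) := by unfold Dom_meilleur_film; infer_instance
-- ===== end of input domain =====

-- B replaces A's single coupled (note, titre) fold by two independent passes
-- (best score first, then the last title attaining it); alternative decomposition, same cost.

-- ===== PORT A =====
-- port of A: one fold carrying (note, titre), branch 'note <= film[1]' as in the Python
def meilleur_film (note_film : List (String × Int)) : String :=
  (note_film.foldl (fun (s : Int × String) film =>
    if s.1 ≤ film.2 then (film.2, film.1) else s) (0, "")).2

-- ===== PORT B =====
-- port of B: two independent passes (best, then last matching title)
def meilleur_film_alt (note_film : List (String × Int)) : String :=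
  let best : Int := note_film.foldl (fun b f => if b < f.2 then f.2 else b) 0
  note_film.foldl (fun t f => if f.2 = best then f.1 else t) ""

-- ===== PRECONDITION & SPEC =====
def Spec_meilleur_film (note_film : List (String × Int)) (out : String) : Prop := out = meilleur_film_alt note_film
instance (note_film : List (String × Int)) (out : String) : Decidable (Spec_meilleur_film note_film out) := by unfold Spec_meilleur_film; infer_instance

-- ===== CLAIM (what is proved, stated in full; the proofs are below) =====
def Claim_equal_meilleur_film : Prop := ∀ (note_film : List (String × Int)), Dom_meilleur_film note_film → Spec_meilleur_film note_film (meilleur_film note_film)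

-- ===== LEMMAS AND PROOFS =====

-- ===== VERDICT (by name: the statement is the Claim_ definition above) =====
theorem le_bestF (xs : List (String × Int)) (b : Int) :
    b ≤ xs.foldl (fun b f => if b < f.2 then f.2 else b) b := by
  induction xs generalizing b with
  | nil => simp
  | cons f rest ih =>
    simp only [List.foldl]
    split
    · exact le_trans (le_of_lt (by assumption)) (ih f.2)
    · exact ih b

theorem bestF_mem (xs : List (String × Int)) (b : Int) :
    xs.foldl (fun b f => if b < f.2 then f.2 else b) b = b ∨
    ∃ g ∈ xs, g.2 = xs.foldl (fun b f => if b < f.2 then f.2 else b) b := by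
  induction xs generalizing b with
  | nil => exact Or.inl rfl
  | cons f rest ih =>
    simp only [List.foldl]
    split
    · rcases ih f.2 with h | ⟨g, hg, hv⟩
      · exact Or.inr ⟨f, List.mem_cons_self .., h.symm⟩
      · exact Or.inr ⟨g, List.mem_cons_of_mem _ hg, hv⟩
    · rcases ih b with h | ⟨g, hg, hv⟩
      · exact Or.inl h
      · exact Or.inr ⟨g, List.mem_cons_of_mem _ hg, hv⟩

theorem titreF_indep (xs : List (String × Int)) (B : Int) (t t' : String)
    (h : ∃ g ∈ xs, g.2 = B) :
    xs.foldl (fun t f => if f.2 = B then f.1 else t) t =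
    xs.foldl (fun t f => if f.2 = B then f.1 else t) t' := by
  induction xs generalizing t t' with
  | nil => rcases h with ⟨g, hg, _⟩; cases hg
  | cons f rest ih =>
    rcases h with ⟨g, hg, hv⟩
    simp only [List.foldl]
    rcases List.mem_cons.1 hg with rfl | hg'
    · simp [hv]
    · by_cases hf : f.2 = B
      · simp [hf]
      · simp only [if_neg hf]
        exact ih _ _ ⟨g, hg', hv⟩

set_option maxRecDepth 4000 in
theorem main_lemma (xs : List (String × Int)) (b : Int) (t : String) :
    xs.foldl (fun (s : Int × String) film =>
      if s.1 ≤ film.2 then (film.2, film.1) else s) (b, t) =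
    (xs.foldl (fun b f => if b < f.2 then f.2 else b) b,
     xs.foldl (fun t f =>
       if f.2 = xs.foldl (fun b f => if b < f.2 then f.2 else b) b then f.1 else t) t) := by
  induction xs generalizing b t with
  | nil => rfl
  | cons f rest ih =>
    simp only [List.foldl]
    by_cases hle : b ≤ f.2
    · rw [if_pos hle, ih]
      have hbest : (if b < f.2 then f.2 else b) = f.2 := by
        rcases lt_or_eq_of_le hle with h | h
        · simp [h]
        · simp [h]
      simp only [hbest]
      refine Prod.ext rfl ?_
      by_cases hf : f.2 = rest.foldl (fun b f => if b < f.2 then f.2 else b) f.2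
      · simp only [if_pos hf]
      · simp only [if_neg hf]
        have hB : ∃ g ∈ rest, g.2 = rest.foldl (fun b f => if b < f.2 then f.2 else b) f.2 := by
          rcases bestF_mem rest f.2 with h | h
          · exact absurd h.symm hf
          · exact h
        exact titreF_indep rest _ _ _ hB
    · rw [if_neg hle, ih]
      have hlt : ¬ b < f.2 := fun h => hle (le_of_lt h)
      have hne : f.2 ≠ rest.foldl (fun b f => if b < f.2 then f.2 else b) b := by
        intro h
        exact hle (le_of_le_of_eq (le_bestF rest b) h.symm)
      simp only [if_neg hlt, if_neg hne]

-- ===== VERDICT (by name: the statement is the Claim_ definition above) =====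
theorem meilleur_film_spec : Claim_equal_meilleur_film := by
  intro xs _
  unfold Spec_meilleur_film meilleur_film meilleur_film_alt
  rw [main_lemma]
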